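-- pv_equiv track=rewrite | github.com/deephyper/deephyper | deephyper/core/analytics/dashboard/_streamlit_app.py | _regroup_results
-- ===== SOURCE A (Python) =====
-- def _regroup_results(res_list):
--     report = {}
--     for results in res_list:
--         for key in report.keys():
--             if key in results.keys():
--                 report[key].append(results[key])
--             else:
--                 report[key].append(None)
--         for key, val in results.items():
--             if key not in report.keys():
--                 report[key] = [val]
--     return report
-- ===== SOURCE B (Python) =====
-- def _regroup_results(res_list):
--     first = {}
--     for i, row in enumerate(res_list):
--         for key in row:
--             first.setdefault(key, i)
--     return {key: [row.get(key) for row in res_list[start:]] for key, start in first.items()}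
-- ===== Notes on version B (the rewrite author's own statement) =====
-- stated objective: simpler
-- what changed: Replaces the incremental per-row column appending (update every existing column, then add new keys) with a two-pass columnar scheme: first record each key's first-appearance row index, then build each column in one comprehension from that index onward.
import Mathlib
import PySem

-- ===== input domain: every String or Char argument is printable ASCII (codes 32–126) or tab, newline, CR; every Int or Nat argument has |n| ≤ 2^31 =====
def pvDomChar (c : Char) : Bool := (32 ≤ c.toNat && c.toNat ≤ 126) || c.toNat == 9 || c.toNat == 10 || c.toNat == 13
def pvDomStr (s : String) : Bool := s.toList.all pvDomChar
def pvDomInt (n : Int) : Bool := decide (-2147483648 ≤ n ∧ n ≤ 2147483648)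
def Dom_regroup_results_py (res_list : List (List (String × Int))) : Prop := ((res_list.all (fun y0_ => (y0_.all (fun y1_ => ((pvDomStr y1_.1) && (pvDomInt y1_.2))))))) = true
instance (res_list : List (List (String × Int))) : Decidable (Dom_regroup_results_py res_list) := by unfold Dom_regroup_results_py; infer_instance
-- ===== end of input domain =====

-- B regroups by first recording each key's first-appearance row, then building each column in one pass; equivalence of the two regroupings is proved below.

-- ===== PORT A =====
-- one row, as the Python dict it denotes
def pvRow (row : List (String × Int)) : PySem.Dict String Int := PySem.Dict.ofList row

-- body of the outer 'for results in res_list' loop of A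
def pvStepA (report : PySem.Dict String (List (Option Int))) (row : List (String × Int)) :
    PySem.Dict String (List (Option Int)) :=
  let results := pvRow row
  -- for key in report.keys(): append results[key] if present else None
  let r1 := report.keys.foldl
    (fun r key => r.modify key []
      (fun v => v ++ [if results.contains key then results.get? key else none])) report
  -- for key, val in results.items(): if key not in report: report[key] = [val]
  results.items.foldl
    (fun r p => if r.contains p.1 then r else r.insert p.1 [some p.2]) r1

def regroup_results_py (res_list : List (List (String × Int))) : List (String × List (Option Int)) :=
  (res_list.foldl pvStepA PySem.Dict.empty).items

-- ===== PORT B =====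
def regroup_results_py_alt (res_list : List (List (String × Int))) : List (String × List (Option Int)) :=
  -- first pass: first.setdefault(key, i) for each key of each row
  let first : PySem.Dict String Int :=
    (PySem.List.enumerate res_list 0).foldl
      (fun d p => (pvRow p.2).keys.foldl (fun d k => d.setdefault k p.1) d)
      PySem.Dict.empty
  -- second pass: one column per key, from its first row onward
  first.items.map (fun p =>
    (p.1, (PySem.List.slice res_list (some p.2) none).map (fun row => (pvRow row).get? p.1)))

-- ===== PRECONDITION & SPEC =====
def Spec_regroup_results_py (res_list : List (List (String × Int))) (out : List (String × List (Option Int))) : Prop := out = regroup_results_py_alt res_list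
instance (res_list : List (List (String × Int))) (out : List (String × List (Option Int))) : Decidable (Spec_regroup_results_py res_list out) := by unfold Spec_regroup_results_py; infer_instance

-- ===== CLAIM (what is proved, stated in full; the proofs are below) =====
def Claim_equal_regroup_results_py : Prop := ∀ (res_list : List (List (String × Int))), Dom_regroup_results_py res_list → Spec_regroup_results_py res_list (regroup_results_py res_list)

-- ===== LEMMAS AND PROOFS =====

-- the column of key k over the rows `rows`
def pvCol (rows : List (List (String × Int))) (k : String) : List (Option Int) :=
  rows.map (fun row => (pvRow row).get? k)

-- the common normal form: pairs (key, column) in first-appearance order, keys in `seen` skipped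
def pvRest (seen : List String) : List (List (String × Int)) → List (String × List (Option Int))
  | [] => []
  | row :: rows =>
      let nk := (pvRow row).keys.filter (fun k => !(seen.contains k))
      nk.map (fun k => (k, pvCol (row :: rows) k)) ++ pvRest (seen ++ nk) rows

-- first-appearance pairs (key, row index), keys in `seen` skipped
def pvFirst (seen : List String) (i : Int) : List (List (String × Int)) → List (String × Int)
  | [] => []
  | row :: rows =>
      let nk := (pvRow row).keys.filter (fun k => !(seen.contains k))
      nk.map (fun k => (k, i)) ++ pvFirst (seen ++ nk) (i + 1) rows

theorem pvFoldlModify (l : List String) (hl : l.Nodup)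
    (d : PySem.Dict String (List (Option Int))) (f : String → List (Option Int) → List (Option Int))
    (k : String) :
    (l.foldl (fun r key => r.modify key [] (f key)) d).getD k [] =
      if k ∈ l then f k (d.getD k []) else d.getD k [] := by
  induction l generalizing d with
  | nil => simp
  | cons a l ih =>
    simp only [List.foldl_cons]
    rcases List.nodup_cons.mp hl with ⟨ha, hl'⟩
    rw [ih hl']
    by_cases hk : k = a
    · subst hk
      simp [ha, PySem.Dict.getD_modify_self]
    · simp only [List.mem_cons, hk, false_or]
      rw [PySem.Dict.getD_modify]; simp [hk]

theorem pvR1_keys (report : PySem.Dict String (List (Option Int)))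
    (f : String → List (Option Int) → List (Option Int)) :
    (report.keys.foldl (fun r key => r.modify key [] (f key)) report).keys = report.keys := by
  rw [PySem.Dict.keys_foldl_modify]
  rw [PySem.Set.update_eq_append_filter]
  have h0 : (PySem.Set.ofList report.keys).filter (fun y => !(PySem.Set.contains report.keys y)) = [] := by
    apply List.filter_eq_nil_iff.mpr
    intro a ha
    simp_all [PySem.Set.contains, PySem.Set.mem_ofList]
  rw [h0, List.append_nil]

theorem pvR1_items (report : PySem.Dict String (List (Option Int))) (hnd : report.keys.Nodup)
    (f : String → List (Option Int) → List (Option Int)) :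
    (report.keys.foldl (fun r key => r.modify key [] (f key)) report).items =
      report.items.map (fun p => (p.1, f p.1 p.2)) := by
  have hkeys := pvR1_keys report f
  have hnd' : (report.keys.foldl (fun r key => r.modify key [] (f key)) report).keys.Nodup := by
    rw [hkeys]; exact hnd
  rw [PySem.Dict.items_eq_map_keys _ hnd' [], hkeys,
      PySem.Dict.items_eq_map_keys report hnd [], List.map_map]
  apply List.map_congr_left
  intro k hk
  simp only [Function.comp]
  rw [pvFoldlModify report.keys hnd report f k, if_pos hk]

theorem pvR2_items (pairs : List (String × Int)) (hnd : (pairs.map Prod.fst).Nodup)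
    (r : PySem.Dict String (List (Option Int))) (hr : r.keys.Nodup) :
    (pairs.foldl (fun r p => if r.contains p.1 then r else r.insert p.1 [some p.2]) r).items =
      r.items ++ (pairs.filter (fun p => !(r.contains p.1))).map (fun p => (p.1, [some p.2])) := by
  induction pairs generalizing r with
  | nil => simp
  | cons q pairs ih =>
    have hmap := hnd
    rw [List.map_cons, List.nodup_cons] at hmap
    rcases hmap with ⟨hq, hnd'⟩
    simp only [List.foldl_cons, List.filter_cons]
    by_cases hc : r.contains q.1
    · rw [if_pos hc, ih hnd' r hr]
      simp [hc]
    · rw [if_neg hc]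
      have hkeys' : (r.insert q.1 [some q.2]).keys.Nodup := PySem.Dict.nodup_keys_insert _ _ _ hr
      rw [ih hnd' _ hkeys']
      rw [PySem.Dict.items_insert_of_not_contains (h := by simpa using hc)]
      have hfc : pairs.filter (fun p => !((r.insert q.1 [some q.2]).contains p.1)) =
          pairs.filter (fun p => !(r.contains p.1)) := by
        apply List.filter_congr
        intro p hp
        have hne : p.1 ≠ q.1 := fun h => hq (h ▸ List.mem_map_of_mem hp)
        rw [PySem.Dict.contains_insert]
        simp [hne]
      rw [hfc]
      simp [hc]

theorem pvStepA_items (report : PySem.Dict String (List (Option Int))) (hnd : report.keys.Nodup)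
    (row : List (String × Int)) :
    (pvStepA report row).items =
      report.items.map (fun p => (p.1, p.2 ++ [(pvRow row).get? p.1])) ++
        ((pvRow row).items.filter (fun p => !(report.keys.contains p.1))).map
          (fun p => (p.1, [some p.2])) := by
  unfold pvStepA
  simp only []
  set f : String → List (Option Int) → List (Option Int) :=
    fun key v => v ++ [if (pvRow row).contains key then (pvRow row).get? key else none] with hf
  have hkeys := pvR1_keys report f
  have hnd1 : (report.keys.foldl (fun r key => r.modify key [] (f key)) report).keys.Nodup := by
    rw [hkeys]; exact hnd
  rw [pvR2_items (pvRow row).items (by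
        have := PySem.Dict.nodup_keys_ofList (κ := String) (ν := Int) row
        simpa [PySem.Dict.keys] using this) _ hnd1]
  rw [pvR1_items report hnd f]
  congr 1
  · apply List.map_congr_left
    intro p _
    simp only [hf]
    congr 1
    rw [PySem.Dict.contains_eq_isSome_get?]
    cases (pvRow row).get? p.1 <;> simp
  · congr 1
    apply List.filter_congr
    intro p _
    rw [PySem.Dict.contains_eq_decide_mem_keys, hkeys]
    congr 1
    simp

theorem pvRest_cons (seen : List String) (row : List (String × Int)) (rows : List (List (String × Int))) :
    pvRest seen (row :: rows) =
      ((pvRow row).keys.filter (fun k => !(seen.contains k))).map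
          (fun k => (k, pvCol (row :: rows) k)) ++
        pvRest (seen ++ (pvRow row).keys.filter (fun k => !(seen.contains k))) rows := rfl

theorem pvFirst_cons (seen : List String) (i : Int) (row : List (String × Int)) (rows : List (List (String × Int))) :
    pvFirst seen i (row :: rows) =
      ((pvRow row).keys.filter (fun k => !(seen.contains k))).map (fun k => (k, i)) ++
        pvFirst (seen ++ (pvRow row).keys.filter (fun k => !(seen.contains k))) (i + 1) rows := rfl

theorem pvStepA_keys (report : PySem.Dict String (List (Option Int))) (hnd : report.keys.Nodup)
    (row : List (String × Int)) :
    (pvStepA report row).keys =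
      report.keys ++ (pvRow row).keys.filter (fun k => !(report.keys.contains k)) := by
  show (pvStepA report row).items.map Prod.fst = _
  rw [pvStepA_items report hnd row, List.map_append, List.map_map, List.map_map]
  congr 1
  show ((pvRow row).items.filter ((fun k => !(report.keys.contains k)) ∘ Prod.fst)).map Prod.fst =
    ((pvRow row).items.map Prod.fst).filter (fun k => !(report.keys.contains k))
  rw [List.filter_map]

theorem pvStepA_nodup (report : PySem.Dict String (List (Option Int))) (hnd : report.keys.Nodup)
    (row : List (String × Int)) : (pvStepA report row).keys.Nodup := by
  rw [pvStepA_keys report hnd row]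
  apply List.Nodup.append hnd
  · exact List.Nodup.filter _ (by
      have := PySem.Dict.nodup_keys_ofList (κ := String) (ν := Int) row
      exact this)
  · intro a ha hb
    have := List.of_mem_filter hb
    simp at this
    exact this ha

theorem pvFoldA (rows : List (List (String × Int)))
    (d : PySem.Dict String (List (Option Int))) (hnd : d.keys.Nodup) :
    (rows.foldl pvStepA d).items =
      d.items.map (fun p => (p.1, p.2 ++ pvCol rows p.1)) ++ pvRest d.keys rows := by
  induction rows generalizing d with
  | nil =>
    simp [pvCol, pvRest]
  | cons row rows ih =>
    rw [List.foldl_cons, ih (pvStepA d row) (pvStepA_nodup d hnd row)]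
    rw [pvStepA_items d hnd row, pvStepA_keys d hnd row]
    rw [List.map_append, List.map_map, List.map_map]
    show _ ++ _ ++ _ = _
    rw [List.append_assoc, pvRest_cons]
    congr 1
    · apply List.map_congr_left
      intro p _
      simp [pvCol, Function.comp]
    · congr 1
      -- new-key part of the head row
      have hfm : ((pvRow row).keys.filter (fun k => !(d.keys.contains k))).map
            (fun k => (k, pvCol (row :: rows) k)) =
          ((pvRow row).items.filter (fun p => !(d.keys.contains p.1))).map
            (fun p => (p.1, pvCol (row :: rows) p.1)) := by
        rw [show (pvRow row).keys = (pvRow row).items.map Prod.fst from rfl,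
            List.filter_map, List.map_map]
        rfl
      rw [hfm]
      apply List.map_congr_left
      intro p hp
      have hpmem : p ∈ (pvRow row).items := List.mem_of_mem_filter hp
      have hget : (pvRow row).get? p.1 = some p.2 := by
        rcases p with ⟨k, v⟩
        exact PySem.Dict.get?_of_mem_items (pvRow row) hpmem
          (PySem.Dict.nodup_keys_ofList row)
      simp [pvCol, Function.comp, hget]

theorem pvContainsKeys {ν : Type} (d : PySem.Dict String ν) (k : String) :
    d.contains k = d.keys.contains k := by
  rw [PySem.Dict.contains_eq_decide_mem_keys]
  simp

theorem pvSetdefaultFold (l : List String) (hl : l.Nodup) (i : Int)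
    (d : PySem.Dict String Int) (hr : d.keys.Nodup) :
    (l.foldl (fun d k => d.setdefault k i) d).items =
      d.items ++ (l.filter (fun k => !(d.contains k))).map (fun k => (k, i)) := by
  induction l generalizing d with
  | nil => simp
  | cons a l ih =>
    rcases List.nodup_cons.mp hl with ⟨ha, hl'⟩
    simp only [List.foldl_cons, List.filter_cons]
    by_cases hc : d.contains a
    · rw [PySem.Dict.setdefault_of_contains (h := hc), ih hl' d hr]
      simp [hc]
    · rw [PySem.Dict.setdefault_of_not_contains (h := by simpa using hc)]
      have hnd' : (d.insert a i).keys.Nodup := PySem.Dict.nodup_keys_insert _ _ _ hr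
      rw [ih hl' _ hnd']
      rw [PySem.Dict.items_insert_of_not_contains (h := by simpa using hc)]
      have hfc : l.filter (fun k => !((d.insert a i).contains k)) =
          l.filter (fun k => !(d.contains k)) := by
        apply List.filter_congr
        intro k hk
        have hne : k ≠ a := fun h => ha (h ▸ hk)
        rw [PySem.Dict.contains_insert]
        simp [hne]
      rw [hfc]
      simp [hc]

theorem pvSetdefaultFold_keys (l : List String) (hl : l.Nodup) (i : Int)
    (d : PySem.Dict String Int) (hr : d.keys.Nodup) :
    (l.foldl (fun d k => d.setdefault k i) d).keys =
      d.keys ++ l.filter (fun k => !(d.contains k)) := by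
  show (l.foldl (fun d k => d.setdefault k i) d).items.map Prod.fst = _
  rw [pvSetdefaultFold l hl i d hr, List.map_append, List.map_map]
  congr 1
  rw [show (Prod.fst ∘ fun k : String => (k, i)) = id from rfl, List.map_id]

theorem pvFoldB (rows : List (List (String × Int))) (i : Int)
    (d : PySem.Dict String Int) (hnd : d.keys.Nodup) :
    ((PySem.List.enumerate rows i).foldl
        (fun d p => (pvRow p.2).keys.foldl (fun d k => d.setdefault k p.1) d) d).items =
      d.items ++ pvFirst d.keys i rows := by
  induction rows generalizing i d with
  | nil => simp [pvFirst]
  | cons row rows ih =>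
    rw [PySem.List.enumerate_cons, List.foldl_cons]
    have hknd : (pvRow row).keys.Nodup := PySem.Dict.nodup_keys_ofList row
    have hnd' : ((pvRow row).keys.foldl (fun d k => d.setdefault k i) d).keys.Nodup := by
      rw [pvSetdefaultFold_keys _ hknd i d hnd]
      apply List.Nodup.append hnd (List.Nodup.filter _ hknd)
      intro a ha hb
      have := List.of_mem_filter hb
      rw [pvContainsKeys, Bool.not_eq_eq_eq_not, Bool.not_true] at this
      simp at this
      exact this ha
    rw [ih (i + 1) _ hnd']
    rw [pvSetdefaultFold _ hknd i d hnd, pvSetdefaultFold_keys _ hknd i d hnd,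
        List.append_assoc, pvFirst_cons]
    congr 2
    · congr 1
      apply List.filter_congr
      intro k _
      rw [pvContainsKeys]
    · congr 2
      apply List.filter_congr
      intro k _
      rw [pvContainsKeys]

theorem pvLink (res_list : List (List (String × Int))) :
    ∀ (rows : List (List (String × Int))) (i : ℕ) (seen : List String),
      res_list.drop i = rows →
      (pvFirst seen (i : Int) rows).map (fun p =>
          (p.1, (PySem.List.slice res_list (some p.2) none).map (fun row => (pvRow row).get? p.1)))
        = pvRest seen rows := by
  intro rows
  induction rows with
  | nil => intro i seen _; rfl
  | cons row rows ih =>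
    intro i seen h
    rw [pvFirst_cons, pvRest_cons, List.map_append, List.map_map]
    congr 1
    · apply List.map_congr_left
      intro k _
      simp only [Function.comp]
      rw [PySem.List.slice_from_natCast, h]
      rfl
    · have hstep : res_list.drop (i + 1) = rows := by
        have h1 : res_list.drop (i + 1) = (res_list.drop i).drop 1 := by
          rw [List.drop_drop]
        rw [h1, h]
        rfl
      have hcast : ((i : Int) + 1) = ((i + 1 : ℕ) : Int) := by push_cast; ring
      rw [hcast]
      exact ih (i + 1) _ hstep

-- ===== VERDICT (by name: the statement is the Claim_ definition above) =====
theorem regroup_results_py_spec : Claim_equal_regroup_results_py := by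
  intro res_list _
  unfold Spec_regroup_results_py regroup_results_py regroup_results_py_alt
  rw [pvFoldA res_list PySem.Dict.empty (by simp [PySem.Dict.keys_empty])]
  show _ = (((PySem.List.enumerate res_list 0).foldl
      (fun d p => (pvRow p.2).keys.foldl (fun d k => d.setdefault k p.1) d)
      PySem.Dict.empty).items.map (fun p =>
    (p.1, (PySem.List.slice res_list (some p.2) none).map (fun row => (pvRow row).get? p.1))))
  rw [pvFoldB res_list 0 PySem.Dict.empty (by simp [PySem.Dict.keys_empty])]
  simp only [PySem.Dict.empty, List.map_nil, List.nil_append]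
  have h0 : ((0 : ℕ) : Int) = (0 : Int) := by norm_num
  exact (h0 ▸ pvLink res_list res_list 0 [] (by simp)).symm
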